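-- pv_equiv track=rewrite | github.com/Dr0x3525/Proyecto-final-programacion | ejercicios_parciales/ejercicios_recuperacion_parcial_1/ejercicio_1.py | buscar_dato_vector_2
-- ===== SOURCE A (Python) =====
-- def Comprobar_ser_primo(numero):
--     numero = int(numero)
--     if numero <= 1:
--         return False
--     else:
--         if numero == 2:
--             return True
--         else:
--             for i in range(2,numero-1):
--                 if numero % i  == 0:
--                     return False
--             return True
--
-- def buscar_dato_vector_2(vector,suma):
--     encontrar_primo_2 = False
--     contador_primo = 0
--
--     for numero in vector:
--         if numero == suma:
--             encontrar_primo_2 = True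
--         if encontrar_primo_2:
--             if Comprobar_ser_primo(numero):
--                 contador_primo += 1
--                 if contador_primo == 2:
--                     return numero
--     return None
-- ===== SOURCE B (Python) =====
-- def es_primo(n):
--     if n < 2:
--         return False
--     i = 2
--     while i * i <= n:
--         if n % i == 0:
--             return False
--         i += 1
--     return True
--
-- def buscar_dato_vector_2(vector, suma):
--     try:
--         start = vector.index(suma)
--     except ValueError:
--         return None
--     contador = 0
--     for numero in vector[start:]:
--         if es_primo(numero):
--             contador += 1
--             if contador == 2:
--                 return numero
--     return None
-- ===== Notes on version B (the rewrite author's own statement) =====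
-- stated objective: alternative
-- what changed: B locates the first occurrence of suma with list.index and counts primes over the tail slice, testing primality by trial division only up to sqrt(n), instead of A's boolean-flag loop with a divisor scan up to n-2; on the generated inputs this was not measurably faster, so no speed is claimed.
import Mathlib
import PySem

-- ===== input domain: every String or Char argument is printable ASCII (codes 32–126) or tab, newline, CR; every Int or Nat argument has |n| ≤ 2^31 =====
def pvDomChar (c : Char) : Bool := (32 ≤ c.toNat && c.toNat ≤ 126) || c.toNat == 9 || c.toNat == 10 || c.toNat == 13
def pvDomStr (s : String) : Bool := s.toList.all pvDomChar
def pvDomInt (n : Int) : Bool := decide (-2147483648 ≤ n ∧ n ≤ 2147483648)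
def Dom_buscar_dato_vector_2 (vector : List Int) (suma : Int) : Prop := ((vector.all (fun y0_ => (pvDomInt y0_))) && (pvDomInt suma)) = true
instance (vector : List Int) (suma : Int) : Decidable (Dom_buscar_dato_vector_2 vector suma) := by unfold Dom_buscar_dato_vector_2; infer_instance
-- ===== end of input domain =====

-- B: list.index to find the first occurrence of suma, then count primes over the tail slice with
-- trial division up to sqrt(n), instead of A's boolean-flag loop with a divisor scan up to n-2.

-- ===== PORT A =====
-- for i in range(2, numero-1): if numero % i == 0: return False
def primoLoopA (n : Int) : List Int → Bool
  | [] => true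
  | i :: rest => if PySem.Int.mod n i = 0 then false else primoLoopA n rest

def comprobar_ser_primo (numero : Int) : Bool :=
  if numero ≤ 1 then false
  else if numero = 2 then true
  else primoLoopA numero (PySem.List.pyRange 2 (numero - 1) 1)

-- the for-loop with state (encontrar_primo_2, contador_primo); early return = some
def buscarLoopA (suma : Int) : List Int → Bool → Int → Option Int
  | [], _, _ => none
  | numero :: rest, enc, cont =>
    let enc' := if numero = suma then true else enc
    if enc' then
      if comprobar_ser_primo numero then
        if cont + 1 = 2 then some numero
        else buscarLoopA suma rest enc' (cont + 1)
      else buscarLoopA suma rest enc' cont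
    else buscarLoopA suma rest enc' cont

def buscar_dato_vector_2 (vector : List Int) (suma : Int) : Option Int :=
  buscarLoopA suma vector false 0

-- ===== PORT B =====
-- the 'while i*i <= n' loop of es_primo; exact: it only runs with n ≥ 2, i ≥ 2, so Nat mirrors the Python ints
def esPrimoLoop (n i : Nat) : Bool :=
  if i * i ≤ n then
    if n % i = 0 then false else esPrimoLoop n (i + 1)
  else true
termination_by n + 1 - i * i
decreasing_by
  have : i * i < (i + 1) * (i + 1) := by nlinarith
  omega

def es_primo (n : Int) : Bool :=
  if n < 2 then false else esPrimoLoop n.toNat 2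

-- for numero in vector[start:] with the contador counter; early return = some
def buscarLoopB : List Int → Int → Option Int
  | [], _ => none
  | numero :: rest, cont =>
    if es_primo numero then
      if cont + 1 = 2 then some numero else buscarLoopB rest (cont + 1)
    else buscarLoopB rest cont

def buscar_dato_vector_2_alt (vector : List Int) (suma : Int) : Option Int :=
  match PySem.List.index? vector suma with
  | none => none                                       -- vector.index raised ValueError
  | some start => buscarLoopB (vector.drop start) 0    -- vector[start:], 0 ≤ start ≤ len

-- ===== PRECONDITION & SPEC =====
def Spec_buscar_dato_vector_2 (vector : List Int) (suma : Int) (out : Option Int) : Prop := out = buscar_dato_vector_2_alt vector suma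
instance (vector : List Int) (suma : Int) (out : Option Int) : Decidable (Spec_buscar_dato_vector_2 vector suma out) := by unfold Spec_buscar_dato_vector_2; infer_instance

-- ===== CLAIM (what is proved, stated in full; the proofs are below) =====
def Claim_equal_buscar_dato_vector_2 : Prop := ∀ (vector : List Int) (suma : Int), Dom_buscar_dato_vector_2 vector suma → Spec_buscar_dato_vector_2 vector suma (buscar_dato_vector_2 vector suma)

-- ===== LEMMAS AND PROOFS =====

-- A's divisor loop returns true iff no listed divisor divides n
theorem primoLoopA_eq_true (n : Int) (l : List Int) :
    primoLoopA n l = true ↔ ∀ i ∈ l, ¬ (i ∣ n) := by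
  induction l with
  | nil => simp [primoLoopA]
  | cons i rest ih =>
    simp only [primoLoopA]
    by_cases h : PySem.Int.mod n i = 0
    · simp [h, (PySem.Int.mod_eq_zero_iff_dvd n i).mp h]
    · rw [if_neg h, ih]
      constructor
      · rintro hall j hj
        rcases List.mem_cons.mp hj with rfl | hj'
        · exact fun hd => h ((PySem.Int.mod_eq_zero_iff_dvd n j).mpr hd)
        · exact hall j hj'
      · intro hall j hj; exact hall j (List.mem_cons_of_mem _ hj)

-- B's trial-division loop returns true iff no divisor j ≥ i with j*j ≤ n divides n
theorem esPrimoLoop_eq_true (n i : Nat) :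
    esPrimoLoop n i = true ↔ ∀ j, i ≤ j → j * j ≤ n → ¬ (j ∣ n) := by
  fun_induction esPrimoLoop n i with
  | case1 i hle hmod =>
    simp only [Bool.false_eq_true, false_iff]
    intro hall
    exact hall i le_rfl hle (Nat.dvd_of_mod_eq_zero hmod)
  | case2 i hle hmod ih =>
    rw [ih]
    constructor
    · intro hall j hij hjj
      rcases Nat.lt_or_ge i j with h | h
      · exact hall j h hjj
      · have hji : j = i := le_antisymm h hij
        subst hji
        intro hd
        exact hmod (Nat.mod_eq_zero_of_dvd hd)
    · intro hall j hij hjj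
      exact hall j (Nat.le_of_succ_le hij) hjj
  | case3 i hgt =>
    simp only [true_iff]
    intro j hij hjj hd
    exact hgt (le_trans (Nat.mul_le_mul hij hij) hjj)

-- both primality tests agree on every Int
theorem prim_eq (n : Int) : comprobar_ser_primo n = es_primo n := by
  unfold comprobar_ser_primo es_primo
  by_cases h1 : n ≤ 1
  · rw [if_pos h1, if_pos (by omega : n < 2)]
  · rw [if_neg h1, if_neg (by omega : ¬ n < 2)]
    by_cases h2 : n = 2
    · subst h2; rw [if_pos rfl]
      symm
      rw [esPrimoLoop_eq_true]
      intro j hj hjj hd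
      have h4 : (2 : Int).toNat = 2 := rfl
      nlinarith
    · rw [if_neg h2]
      have h3 : 3 ≤ n := by omega
      rw [Bool.eq_iff_iff, primoLoopA_eq_true, esPrimoLoop_eq_true]
      have hmn : n = (n.toNat : Int) := by omega
      constructor
      · intro hall j h2j hjj hdj
        have h2j' : 2 * j ≤ j * j := Nat.mul_le_mul_right j h2j
        have hjm : (j : Int) ∈ PySem.List.pyRange 2 (n - 1) 1 := by
          rw [PySem.List.mem_pyRange_one]
          omega
        exact hall _ hjm (by rw [hmn]; exact_mod_cast hdj)
      · intro hall i hi hdi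
        rw [PySem.List.mem_pyRange_one] at hi
        obtain ⟨h2i, hilt⟩ := hi
        have hid : i = (i.toNat : Int) := by omega
        set d := i.toNat with hd
        have hdm : d ∣ n.toNat := by
          rw [hid, hmn] at hdi; exact_mod_cast hdi
        have h2d : 2 ≤ d := by omega
        have hdle : d ≤ n.toNat - 2 := by omega
        by_cases hdd : d * d ≤ n.toNat
        · exact hall d h2d hdd hdm
        · set e := n.toNat / d with he
          have hde : d * e = n.toNat := Nat.mul_div_cancel' hdm
          have he0 : e ≠ 0 := by intro h0; rw [h0, Nat.mul_zero] at hde; omega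
          have he1 : e ≠ 1 := by intro h1; rw [h1, Nat.mul_one] at hde; omega
          have hed : e < d := by nlinarith
          have hee : e * e ≤ n.toNat :=
            le_trans (Nat.mul_le_mul_left e (le_of_lt hed)) (le_of_eq ((Nat.mul_comm e d) ▸ hde))
          exact hall e ((Nat.two_le_iff e).mpr ⟨he0, he1⟩) hee ⟨d, by rw [← hde, Nat.mul_comm]⟩

-- once the flag is set, A's loop is B's counting loop
theorem loopA_true (suma : Int) (l : List Int) (c : Int) :
    buscarLoopA suma l true c = buscarLoopB l c := by
  induction l generalizing c with
  | nil => rfl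
  | cons x rest ih =>
    simp only [buscarLoopA, buscarLoopB, if_pos, ite_self, prim_eq]
    split_ifs <;> simp [ih]

theorem main_eq (l : List Int) (suma : Int) :
    buscarLoopA suma l false 0 = buscar_dato_vector_2_alt l suma := by
  induction l with
  | nil => rfl
  | cons x rest ih =>
    by_cases hx : x = suma
    · subst hx
      rw [buscar_dato_vector_2_alt, PySem.List.index?_cons_self]
      simp only [List.drop_zero]
      rw [← loopA_true x (x :: rest) 0]
      simp [buscarLoopA]
    · rw [buscar_dato_vector_2_alt, PySem.List.index?_cons_of_ne rest hx]
      have hstep : buscarLoopA suma (x :: rest) false 0 = buscarLoopA suma rest false 0 := by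
        simp [buscarLoopA, hx]
      rw [hstep, ih, buscar_dato_vector_2_alt]
      cases PySem.List.index? rest suma with
      | none => rfl
      | some k => simp

-- ===== VERDICT (by name: the statement is the Claim_ definition above) =====
theorem buscar_dato_vector_2_spec : Claim_equal_buscar_dato_vector_2 := by
  intro vector suma _
  unfold Spec_buscar_dato_vector_2 buscar_dato_vector_2
  exact main_eq vector suma
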